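-- pv_equiv track=rewrite | github.com/NicholasTurner23/snippets | reversestring_leave_special.py | reverse_letters
-- ===== SOURCE A (Python) =====
-- def reverse_letters(s):
--     s_list = list(s)
--     start, end = 0, len(s_list) - 1
--
--     while start < end:
--         while start < end and not s_list[start].isalpha():
--             start += 1
--         while start < end and not s_list[end].isalpha():
--             end -= 1
--
--         s_list[start], s_list[end] = s_list[end], s_list[start]
--         start += 1
--         end -= 1
--
--     return ''.join(s_list)
-- ===== SOURCE B (Python) =====
-- def reverse_letters(s):
--     rev = iter([c for c in s if c.isalpha()][::-1])
--     return ''.join(next(rev) if c.isalpha() else c for c in s)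
-- ===== Notes on version B (the rewrite author's own statement) =====
-- stated objective: alternative
-- what changed: Replaces the in-place converging two-pointer swap with an extract-then-refill pass: collect the alphabetic characters, reverse them, and emit them back into the alphabetic positions in one left-to-right pass.
import Mathlib
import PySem

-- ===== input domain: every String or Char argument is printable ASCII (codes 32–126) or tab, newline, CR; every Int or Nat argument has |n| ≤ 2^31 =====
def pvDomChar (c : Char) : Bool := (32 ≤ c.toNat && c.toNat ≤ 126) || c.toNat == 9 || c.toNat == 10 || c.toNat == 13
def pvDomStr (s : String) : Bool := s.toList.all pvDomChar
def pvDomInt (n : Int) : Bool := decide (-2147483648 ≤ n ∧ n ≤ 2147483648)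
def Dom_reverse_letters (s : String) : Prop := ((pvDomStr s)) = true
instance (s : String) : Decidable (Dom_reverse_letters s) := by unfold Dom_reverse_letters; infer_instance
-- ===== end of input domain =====

-- B replaces A's in-place two-pointer swap by collecting the letters, reversing them,
-- and refilling the alphabetic positions in one left-to-right pass (alternative algorithm, same cost).

-- ===== PORT A =====
-- inner `while start < end and not s_list[start].isalpha(): start += 1`
-- (fuel `fin - start` bounds the loop exactly; indices are always in range when read, so `getD` is exact)
def skipL : Nat → List Char → Nat → Nat → Nat
  | 0, _, start, _ => start
  | fuel + 1, l, start, fin =>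
    if start < fin ∧ ¬ PySem.Chars.isalpha (l.getD start ' ') then
      skipL fuel l (start + 1) fin
    else start

-- inner `while start < end and not s_list[end].isalpha(): end -= 1`
def skipR : Nat → List Char → Nat → Nat → Nat
  | 0, _, _, fin => fin
  | fuel + 1, l, lo, fin =>
    if lo < fin ∧ ¬ PySem.Chars.isalpha (l.getD fin ' ') then
      skipR fuel l lo (fin - 1)
    else fin

-- outer `while start < end:` loop of A (the simultaneous swap reads both cells first);
-- fuel `l.length` covers every iteration since `start` grows each time round
def loopA : Nat → List Char → Nat → Nat → List Char
  | 0, l, _, _ => l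
  | fuel + 1, l, start, fin =>
    if start < fin then
      let i := skipL (fin - start) l start fin
      let j := skipR (fin - i) l i fin
      let l' := (l.set i (l.getD j ' ')).set j (l.getD i ' ')
      loopA fuel l' (i + 1) (j - 1)
    else l

-- empty string: Python's `end = len-1 = -1` gives no iterations, as does Nat `0 - 1 = 0`
def reverse_letters (s : String) : String :=
  String.mk (loopA s.toList.length s.toList 0 (s.toList.length - 1))

-- ===== PORT B =====
-- `''.join(next(rev) if c.isalpha() else c for c in s)`, consuming `rev` from the front;
-- the `[]` fallback is unreachable for B's call (the letter count matches exactly)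
def fillB : List Char → List Char → List Char
  | [], _ => []
  | c :: cs, ls =>
    if PySem.Chars.isalpha c then
      match ls with
      | r :: rs => r :: fillB cs rs
      | [] => c :: fillB cs []
    else c :: fillB cs ls

def reverse_letters_alt (s : String) : String :=
  String.mk (fillB s.toList ((s.toList.filter PySem.Chars.isalpha).reverse))

-- ===== PRECONDITION & SPEC =====
def Spec_reverse_letters (s : String) (out : String) : Prop := out = reverse_letters_alt s
instance (s : String) (out : String) : Decidable (Spec_reverse_letters s out) := by unfold Spec_reverse_letters; infer_instance

-- ===== CLAIM (what is proved, stated in full; the proofs are below) =====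
def Claim_equal_reverse_letters : Prop := ∀ (s : String), Dom_reverse_letters s → Spec_reverse_letters s (reverse_letters s)

-- ===== LEMMAS AND PROOFS =====

theorem skipL_ge (fuel : Nat) (l : List Char) :
    ∀ start fin, start ≤ skipL fuel l start fin := by
  induction fuel with
  | zero => intro start fin; simp [skipL]
  | succ f ih =>
    intro start fin
    simp only [skipL]
    split_ifs with h
    · exact le_trans (by omega) (ih (start + 1) fin)
    · exact le_refl _

theorem skipL_le (fuel : Nat) (l : List Char) :
    ∀ start fin, start ≤ fin → skipL fuel l start fin ≤ fin := by
  induction fuel with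
  | zero => intro start fin h0; simpa [skipL] using h0
  | succ f ih =>
    intro start fin h0
    simp only [skipL]
    split_ifs with h
    · exact ih (start + 1) fin (by omega)
    · exact h0

theorem skipL_none (fuel : Nat) (l : List Char) :
    ∀ start fin k, start ≤ k → k < skipL fuel l start fin →
      PySem.Chars.isalpha (l.getD k ' ') = false := by
  induction fuel with
  | zero => intro start fin k hk1 hk2; simp [skipL] at hk2; omega
  | succ f ih =>
    intro start fin k hk1 hk2
    simp only [skipL] at hk2
    split_ifs at hk2 with h
    · rcases Nat.eq_or_lt_of_le hk1 with rfl | hlt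
      · simpa using h.2
      · exact ih (start + 1) fin k hlt hk2
    · omega

theorem skipL_hit (fuel : Nat) (l : List Char) :
    ∀ start fin, fin - start ≤ fuel → skipL fuel l start fin < fin →
      PySem.Chars.isalpha (l.getD (skipL fuel l start fin) ' ') = true := by
  induction fuel with
  | zero => intro start fin hf h; simp [skipL] at h ⊢; exact absurd h (by omega)
  | succ f ih =>
    intro start fin hf h
    simp only [skipL] at h ⊢
    split_ifs at h ⊢ with hc
    · exact ih (start + 1) fin (by omega) h
    · by_cases ha : PySem.Chars.isalpha (l.getD start ' ') = true
      · exact ha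
      · exact absurd ⟨h, fun hh => ha hh⟩ hc

theorem skipR_le (fuel : Nat) (l : List Char) :
    ∀ lo fin, skipR fuel l lo fin ≤ fin := by
  induction fuel with
  | zero => intro lo fin; simp [skipR]
  | succ f ih =>
    intro lo fin
    simp only [skipR]
    split_ifs with h
    · exact le_trans (ih lo (fin - 1)) (by omega)
    · exact le_refl _

theorem skipR_ge (fuel : Nat) (l : List Char) :
    ∀ lo fin, lo ≤ fin → lo ≤ skipR fuel l lo fin := by
  induction fuel with
  | zero => intro lo fin h0; simpa [skipR] using h0
  | succ f ih =>
    intro lo fin h0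
    simp only [skipR]
    split_ifs with h
    · exact ih lo (fin - 1) (by omega)
    · exact h0

theorem skipR_none (fuel : Nat) (l : List Char) :
    ∀ lo fin k, skipR fuel l lo fin < k → k ≤ fin →
      PySem.Chars.isalpha (l.getD k ' ') = false := by
  induction fuel with
  | zero => intro lo fin k hk1 hk2; simp [skipR] at hk1; omega
  | succ f ih =>
    intro lo fin k hk1 hk2
    simp only [skipR] at hk1
    split_ifs at hk1 with h
    · rcases Nat.eq_or_lt_of_le hk2 with rfl | hlt
      · simpa using h.2
      · exact ih lo (fin - 1) k hk1 (by omega)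
    · omega

theorem skipR_hit (fuel : Nat) (l : List Char) :
    ∀ lo fin, fin - lo ≤ fuel → lo < skipR fuel l lo fin →
      PySem.Chars.isalpha (l.getD (skipR fuel l lo fin) ' ') = true := by
  induction fuel with
  | zero => intro lo fin hf h; simp [skipR] at h ⊢; exact absurd h (by omega)
  | succ f ih =>
    intro lo fin hf h
    simp only [skipR] at h ⊢
    split_ifs at h ⊢ with hc
    · exact ih lo (fin - 1) (by omega) h
    · by_cases ha : PySem.Chars.isalpha (l.getD fin ' ') = true
      · exact ha
      · exact absurd ⟨h, fun hh => ha hh⟩ hc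

theorem loopA_stop (fuel : Nat) (l : List Char) (start fin : Nat) (h : ¬ start < fin) :
    loopA fuel l start fin = l := by
  cases fuel with
  | zero => rfl
  | succ f => simp [loopA, h]

theorem fillB_nil (xs : List Char) : fillB xs [] = xs := by
  induction xs with
  | nil => rfl
  | cons c cs ih => by_cases h : PySem.Chars.isalpha c <;> simp [fillB, h, ih]

theorem fillB_append (xs ys ls : List Char) :
    fillB (xs ++ ys) ls = fillB xs ls ++ fillB ys (ls.drop (xs.filter PySem.Chars.isalpha).length) := by
  induction xs generalizing ls with
  | nil => simp [fillB]
  | cons c cs ih =>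
    by_cases h : PySem.Chars.isalpha c
    · cases ls with
      | nil => simp [fillB, h, ih, List.filter_cons]
      | cons r rs => simp [fillB, h, ih, List.filter_cons]
    · simp [fillB, h, ih, List.filter_cons]

theorem fillB_stop (xs ls ex : List Char)
    (h : (xs.filter PySem.Chars.isalpha).length ≤ ls.length) :
    fillB xs (ls ++ ex) = fillB xs ls := by
  induction xs generalizing ls with
  | nil => rfl
  | cons c cs ih =>
    by_cases hc : PySem.Chars.isalpha c
    · cases ls with
      | nil => simp [List.filter_cons, hc] at h
      | cons r rs =>
        simp only [List.filter_cons, hc, if_pos, List.length_cons] at h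
        simp [fillB, hc, ih rs (by omega)]
    · simp only [List.filter_cons, hc] at h
      simp [fillB, hc, ih ls (by simpa using h)]

theorem fillB_noalpha (xs ls : List Char) (h : xs.filter PySem.Chars.isalpha = []) :
    fillB xs ls = xs := by
  induction xs generalizing ls with
  | nil => rfl
  | cons c cs ih =>
    simp only [List.filter_cons] at h
    by_cases hc : PySem.Chars.isalpha c
    · simp [hc] at h
    · simp only [hc] at h
      simp [fillB, hc, ih ls h]

theorem fillB_short (xs : List Char)
    (h : (xs.filter PySem.Chars.isalpha).length ≤ 1) :
    fillB xs (xs.filter PySem.Chars.isalpha).reverse = xs := by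
  induction xs with
  | nil => rfl
  | cons c cs ih =>
    by_cases hc : PySem.Chars.isalpha c
    · simp only [List.filter_cons, if_pos hc, List.length_cons] at h
      have hnil : cs.filter PySem.Chars.isalpha = [] := by
        cases hcs : cs.filter PySem.Chars.isalpha with
        | nil => rfl
        | cons a as => rw [hcs] at h; simp at h
      simp [List.filter_cons, hc, hnil, fillB, fillB_nil]
    · simp only [List.filter_cons, if_neg hc] at h ⊢
      simp [fillB, hc, ih h]

theorem seg_split (l : List Char) (s a f : Nat) (hsa : s ≤ a) (haf : a ≤ f) (hf : f < l.length) :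
    (l.drop s).take (f + 1 - s)
      = (l.drop s).take (a - s) ++ l[a] :: (l.drop (a + 1)).take (f - a) := by
  have h1 : f + 1 - s = (a - s) + (f + 1 - a) := by omega
  rw [h1, List.take_add]
  congr 1
  have h2 : (l.drop s).drop (a - s) = l.drop a := by
    rw [List.drop_drop]; congr 1; omega
  rw [h2]
  have hlt : a < l.length := by omega
  rw [List.drop_eq_getElem_cons hlt]
  have h4 : f + 1 - a = (f - a) + 1 := by omega
  rw [h4, List.take_succ_cons]

theorem splice (l : List Char) (k m : Nat) :
    l.take k ++ ((l.drop k).take m ++ l.drop (k + m)) = l := by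
  have h : l.drop (k + m) = (l.drop k).drop m := by rw [List.drop_drop, Nat.add_comm]
  rw [h, List.take_append_drop, List.take_append_drop]

theorem noalpha_take (l : List Char) (a b : Nat) (hb : b ≤ l.length)
    (h : ∀ k, a ≤ k → k < b → PySem.Chars.isalpha (l.getD k ' ') = false) :
    ((l.drop a).take (b - a)).filter PySem.Chars.isalpha = [] := by
  rw [List.filter_eq_nil_iff]
  intro c hc
  obtain ⟨idx, hidx, hcc⟩ := List.mem_iff_getElem.1 hc
  have hlen : idx < b - a ∧ a + idx < l.length := by
    simp only [List.length_take, List.length_drop] at hidx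
    omega
  rw [List.getElem_take, List.getElem_drop] at hcc
  have hd : l.getD (a + idx) ' ' = l[a + idx] := List.getD_eq_getElem l ' ' hlen.2
  rw [← hcc]
  have := h (a + idx) (by omega) (by omega)
  rw [hd] at this
  simp [this]

theorem rhs_single (l : List Char) (start : Nat) (hlen : start < l.length) :
    l.take start
      ++ fillB ((l.drop start).take (start + 1 - start))
           (((l.drop start).take (start + 1 - start)).filter PySem.Chars.isalpha).reverse
      ++ l.drop (start + 1) = l := by
  have hseg : (l.drop start).take (start + 1 - start) = [l[start]] := by
    have h1 : start + 1 - start = 1 := by omega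
    rw [h1, List.take_one, List.head?_drop, List.getElem?_eq_getElem hlen]
    rfl
  rw [hseg]
  have hfill : fillB [l[start]] (([l[start]].filter PySem.Chars.isalpha).reverse) = [l[start]] := by
    apply fillB_short
    by_cases hc : PySem.Chars.isalpha l[start] <;> simp [List.filter_cons, hc]
  rw [hfill, ← hseg]
  have := splice l start (start + 1 - start)
  rw [show start + (start + 1 - start) = start + 1 by omega,
    ← List.append_assoc] at this
  exact this

theorem loopA_main (fuel : Nat) : ∀ (l : List Char) (start fin : Nat), fin - start ≤ fuel →
    fin < l.length → start ≤ fin →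
    loopA fuel l start fin
      = l.take start
        ++ fillB ((l.drop start).take (fin + 1 - start))
             (((l.drop start).take (fin + 1 - start)).filter PySem.Chars.isalpha).reverse
        ++ l.drop (fin + 1) := by
  induction fuel with
  | zero =>
    intro l start fin hn hlen hsf
    have hse : start = fin := by omega
    subst hse
    exact (rhs_single l start hlen).symm
  | succ f IH =>
  intro l start fin hn hlen hsf
  by_cases hlt : start < fin
  case neg =>
    have hse : start = fin := by omega
    subst hse
    rw [loopA_stop _ _ _ _ hlt]
    exact (rhs_single l start hlen).symm
  case pos =>
  simp only [loopA, if_pos hlt]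
  have hstart_i : start ≤ skipL (fin - start) l start fin := skipL_ge (fin - start) l start fin
  have hi_fin : skipL (fin - start) l start fin ≤ fin :=
    skipL_le (fin - start) l start fin (by omega)
  set i := skipL (fin - start) l start fin with hidef
  have hij : i ≤ skipR (fin - i) l i fin := skipR_ge (fin - i) l i fin hi_fin
  have hj_fin : skipR (fin - i) l i fin ≤ fin := skipR_le (fin - i) l i fin
  set j := skipR (fin - i) l i fin with hjdef
  have hilen : i < l.length := by omega
  have hjlen : j < l.length := by omega
  have hgdj : l.getD j ' ' = l[j] := List.getD_eq_getElem l ' ' hjlen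
  have hgdi : l.getD i ' ' = l[i] := List.getD_eq_getElem l ' ' hilen
  by_cases hcase : i < j
  case neg =>
    -- i = j : at most one letter in the segment; the swap is a no-op
    have hieqj : i = j := by omega
    have hl' : (l.set i (l.getD j ' ')).set j (l.getD i ' ') = l := by
      rw [← hieqj, hgdi, List.set_getElem_self hilen, List.set_getElem_self hilen]
    rw [hl']
    rw [loopA_stop f l (i + 1) (j - 1) (by omega)]
    -- segment decomposition around position i
    have hseg := seg_split l start i fin hstart_i hi_fin hlen
    have hfP : ((l.drop start).take (i - start)).filter PySem.Chars.isalpha = [] := by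
      have hb : i ≤ l.length := by omega
      exact noalpha_take l start i hb (fun k hk1 hk2 => skipL_none (fin - start) l start fin k hk1 hk2)
    have hfQ : ((l.drop (i + 1)).take (fin - i)).filter PySem.Chars.isalpha = [] := by
      have : fin + 1 - (i + 1) = fin - i := by omega
      rw [← this]
      exact noalpha_take l (i + 1) (fin + 1) (by omega)
        (fun k hk1 hk2 => skipR_none (fin - i) l i fin k (by omega) (by omega))
    have hshort : (((l.drop start).take (fin + 1 - start)).filter PySem.Chars.isalpha).length ≤ 1 := by
      rw [hseg, List.filter_append, hfP, List.filter_cons]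
      by_cases hc : PySem.Chars.isalpha l[i] <;> simp [hc, hfQ]
    rw [fillB_short _ hshort]
    have := splice l start (fin + 1 - start)
    rw [show start + (fin + 1 - start) = fin + 1 by omega,
      ← List.append_assoc] at this
    exact this.symm
  case pos =>
  -- i < j : letters at i and j are swapped, recurse on the middle
  have hifin : i < fin := by omega
  have ha : PySem.Chars.isalpha l[i] = true := by
    have := skipL_hit (fin - start) l start fin (le_refl _) (by omega)
    rwa [← hidef, hgdi] at this
  have hb : PySem.Chars.isalpha l[j] = true := by
    have := skipR_hit (fin - i) l i fin (le_refl _) (by omega)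
    rwa [← hjdef, hgdj] at this
  set P := (l.drop start).take (i - start) with hPdef
  set M := (l.drop (i + 1)).take (j - (i + 1)) with hMdef
  set Q := (l.drop (j + 1)).take (fin - j) with hQdef
  have hMlen : M.length = j - (i + 1) := by
    rw [hMdef, List.length_take, List.length_drop]; omega
  -- explicit form of the swapped list
  have hl' : (l.set i (l.getD j ' ')).set j (l.getD i ' ')
      = l.take i ++ l[j] :: (M ++ l[i] :: l.drop (j + 1)) := by
    rw [hgdi, hgdj]
    have h1 : l.set i l[j] = l.take i ++ l[j] :: l.drop (i + 1) := by
      rw [List.set_eq_take_append_cons_drop, if_pos hilen]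
    rw [h1, List.set_eq_take_append_cons_drop,
      if_pos (show j < (l.take i ++ l[j] :: l.drop (i + 1)).length by
        simp [List.length_take] <;> omega)]
    have htk : (l.take i ++ l[j] :: l.drop (i + 1)).take j
        = l.take i ++ l[j] :: M := by
      rw [List.take_append, List.take_of_length_le (by simp [List.length_take] <;> omega)]
      congr 1
      have : j - (l.take i).length = (j - (i + 1)) + 1 := by
        simp [List.length_take] <;> omega
      rw [this, List.take_succ_cons, hMdef]
    have hdr : (l.take i ++ l[j] :: l.drop (i + 1)).drop (j + 1) = l.drop (j + 1) := by
      rw [List.drop_append, List.drop_eq_nil_of_le (by simp [List.length_take] <;> omega)]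
      have : j + 1 - (l.take i).length = (j - (i + 1)) + 1 + 1 := by
        simp [List.length_take] <;> omega
      rw [this, List.drop_succ_cons, List.drop_drop, List.nil_append]
      congr 1
      omega
    rw [htk, hdr]
    simp [List.append_assoc]
  rw [hl']
  set E := l.take i ++ l[j] :: (M ++ l[i] :: l.drop (j + 1)) with hEdef
  have hElen : E.length = l.length := by
    rw [hEdef]; simp [List.length_take, hMlen, List.length_drop]; omega
  have htkE : E.take (i + 1) = l.take i ++ [l[j]] := by
    rw [hEdef, List.take_append, List.take_of_length_le (by simp [List.length_take] <;> omega)]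
    have : i + 1 - (l.take i).length = 1 := by simp [List.length_take] <;> omega
    rw [this, List.take_one]
    rfl
  have hdrE : E.drop (i + 1) = M ++ l[i] :: l.drop (j + 1) := by
    rw [hEdef, List.drop_append, List.drop_eq_nil_of_le (by simp [List.length_take] <;> omega)]
    have : i + 1 - (l.take i).length = 1 := by simp [List.length_take] <;> omega
    rw [this, List.drop_one, List.nil_append]
    rfl
  have hsegE : (E.drop (i + 1)).take (j - 1 + 1 - (i + 1)) = M := by
    rw [hdrE, show j - 1 + 1 - (i + 1) = j - (i + 1) by omega,
      List.take_append, List.take_of_length_le (by omega),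
      show j - (i + 1) - M.length = 0 by omega, List.take_zero, List.append_nil]
  have hdrjE : E.drop (j - 1 + 1) = l[i] :: l.drop (j + 1) := by
    rw [hEdef, show j - 1 + 1 = j by omega, List.drop_append,
      List.drop_eq_nil_of_le (by simp [List.length_take] <;> omega)]
    have : j - (l.take i).length = (j - (i + 1)) + 1 := by simp [List.length_take] <;> omega
    rw [this, List.drop_succ_cons, List.drop_append,
      List.drop_eq_nil_of_le (by omega),
      show j - (i + 1) - M.length = 0 by omega, List.drop_zero, List.nil_append]
    simp
  -- the recursive call, uniformly for j = i + 1 and j > i + 1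
  have hstep : loopA f E (i + 1) (j - 1)
      = l.take i ++ l[j] :: (fillB M (M.filter PySem.Chars.isalpha).reverse ++ l[i] :: l.drop (j + 1)) := by
    by_cases hadj : i + 1 < j - 1
    · have hIH := IH E (i + 1) (j - 1) (by omega) (by rw [hElen]; omega) (by omega)
      rw [hIH, hsegE, htkE, hdrjE]
      simp [List.append_assoc]
    · -- adjacent: the recursion stops immediately and M is empty or a singleton
      rw [loopA_stop f E (i + 1) (j - 1) hadj]
      have hM' : M = (E.drop (i + 1)).take (j - 1 + 1 - (i + 1)) := hsegE.symm
      by_cases hMe : j = i + 1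
      · have hMnil : M = [] := by rw [hMdef]; simp [hMe]
        rw [hEdef, hMnil]
        simp [fillB]
      · -- j = i + 2: M is a single character, which fillB leaves in place
        have hj2 : j = i + 2 := by omega
        have hMone : M = [l[i + 1]] := by
          rw [hMdef, hj2, show i + 2 - (i + 1) = 1 by omega, List.take_one,
            List.head?_drop, List.getElem?_eq_getElem (by omega)]
          rfl
        have hfM : fillB M (M.filter PySem.Chars.isalpha).reverse = M := by
          apply fillB_short
          rw [hMone]
          by_cases hc : PySem.Chars.isalpha l[i + 1] <;> simp [List.filter_cons, hc]
        rw [hfM]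
  rw [hstep]
  -- now compute the right-hand side
  have hseg := seg_split l start i fin hstart_i hi_fin hlen
  have hseg2 : (l.drop (i + 1)).take (fin - i) = M ++ l[j] :: Q := by
    have h1 := seg_split l (i + 1) j fin (by omega) (by omega) hlen
    rwa [show fin + 1 - (i + 1) = fin - i by omega] at h1
  have hfP : P.filter PySem.Chars.isalpha = [] := by
    exact noalpha_take l start i (by omega)
      (fun k hk1 hk2 => skipL_none (fin - start) l start fin k hk1 hk2)
  have hfQ : Q.filter PySem.Chars.isalpha = [] := by
    rw [hQdef, show fin - j = fin + 1 - (j + 1) by omega]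
    exact noalpha_take l (j + 1) (fin + 1) (by omega)
      (fun k hk1 hk2 => skipR_none (fin - i) l i fin k (by omega) (by omega))
  have hfseg : ((l.drop start).take (fin + 1 - start)).filter PySem.Chars.isalpha
      = l[i] :: (M.filter PySem.Chars.isalpha ++ [l[j]]) := by
    rw [hseg, hseg2, List.filter_append, hfP, List.filter_cons, if_pos ha,
      List.filter_append, List.filter_cons, if_pos hb, hfQ, List.nil_append]
  rw [hfseg]
  set rfM := (M.filter PySem.Chars.isalpha).reverse with hrfM
  have hrev : (l[i] :: (M.filter PySem.Chars.isalpha ++ [l[j]])).reverse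
      = l[j] :: (rfM ++ [l[i]]) := by
    simp [hrfM]
  rw [hrev, hseg, hseg2]
  have hcount : (M.filter PySem.Chars.isalpha).length = rfM.length := by simp [hrfM]
  -- evaluate fillB on the decomposed segment
  have hfill : fillB (P ++ l[i] :: (M ++ l[j] :: Q)) (l[j] :: (rfM ++ [l[i]]))
      = P ++ l[j] :: (fillB M rfM ++ l[i] :: Q) := by
    rw [fillB_append, fillB_noalpha P _ hfP, hfP, List.length_nil, List.drop_zero]
    congr 1
    show fillB (l[i] :: (M ++ l[j] :: Q)) (l[j] :: (rfM ++ [l[i]])) = _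
    rw [show fillB (l[i] :: (M ++ l[j] :: Q)) (l[j] :: (rfM ++ [l[i]]))
        = l[j] :: fillB (M ++ l[j] :: Q) (rfM ++ [l[i]]) by simp [fillB, ha]]
    congr 1
    rw [fillB_append, fillB_stop M rfM [l[i]] (by omega), hcount,
      List.drop_append_of_le_length (le_refl _), List.drop_length, List.nil_append]
    congr 1
    rw [show fillB (l[j] :: Q) [l[i]] = l[i] :: fillB Q [] by simp [fillB, hb],
      fillB_nil]
  rw [hfill]
  -- reassemble: take start l ++ P = take i l and Q ++ drop (fin+1) l = drop (j+1) l
  have hPfront : l.take start ++ P = l.take i := by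
    rw [hPdef, show i = start + (i - start) by omega, List.take_add]
    congr 2
    omega
  have hQback : Q ++ l.drop (fin + 1) = l.drop (j + 1) := by
    rw [hQdef, show l.drop (fin + 1) = (l.drop (j + 1)).drop (fin - j) by
      rw [List.drop_drop]; congr 1; omega, List.take_append_drop]
  calc l.take i ++ l[j] :: (fillB M rfM ++ l[i] :: l.drop (j + 1))
      = l.take i ++ l[j] :: (fillB M rfM ++ l[i] :: (Q ++ l.drop (fin + 1))) := by
        rw [hQback]
    _ = l.take start ++ (P ++ l[j] :: (fillB M rfM ++ l[i] :: Q)) ++ l.drop (fin + 1) := by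
        rw [← hPfront]
        simp [List.append_assoc]

-- ===== VERDICT (by name: the statement is the Claim_ definition above) =====
theorem reverse_letters_spec : Claim_equal_reverse_letters := by
  unfold Claim_equal_reverse_letters Spec_reverse_letters reverse_letters reverse_letters_alt
  intro s _
  congr 1
  cases hl : s.toList with
  | nil => rfl
  | cons c cs =>
    have hpos : 0 < (c :: cs).length := by simp
    have h := loopA_main (c :: cs).length (c :: cs) 0 ((c :: cs).length - 1)
      (by omega) (by omega) (by omega)
    rw [h, show (c :: cs).length - 1 + 1 - 0 = (c :: cs).length by omega]
    simp [List.take_length, List.drop_length, show (c :: cs).length - 1 + 1 = (c :: cs).length by omega]
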